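-- pv_equiv track=rewrite | github.com/vdslab/IPSep-CoLa | src/sgd/torus_util.py | nearest_xy_torus2d
-- ===== SOURCE A (Python) =====
-- def nearest_xy_torus2d(center, other):
--     x = other[0]
--     y = other[1]
--     d = float("inf")
--     near = [other[0], other[1]]
--     for dy in [-1, 0, 1]:
--         y0 = y + dy
--         for dx in [-1, 0, 1]:
--             x0 = x + dx
--             dist = (center[0] - x0) ** 2 + (center[1] - y0) ** 2
--             if dist < d:
--                 d = dist
--                 near = [x0, y0]
--
--     return near
-- ===== SOURCE B (Python) =====
-- def _best_shift(c, v):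
--     best = -1
--     bestd = (c - (v - 1)) ** 2
--     for delta in (0, 1):
--         dd = (c - (v + delta)) ** 2
--         if dd < bestd:
--             bestd = dd
--             best = delta
--     return best
--
--
-- def nearest_xy_torus2d(center, other):
--     x = other[0]
--     y = other[1]
--     return [x + _best_shift(center[0], x), y + _best_shift(center[1], y)]
-- ===== Notes on version B (the rewrite author's own statement) =====
-- stated objective: simpler
-- what changed: The squared torus distance is separable in x and y, so B replaces A's nested 3x3 scan with min-tracking over 9 candidates by two independent 1-D scans over the three shifts per axis (first strict minimum wins on each axis, matching A's tie-breaking), then combines the two best shifts.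
import Mathlib
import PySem

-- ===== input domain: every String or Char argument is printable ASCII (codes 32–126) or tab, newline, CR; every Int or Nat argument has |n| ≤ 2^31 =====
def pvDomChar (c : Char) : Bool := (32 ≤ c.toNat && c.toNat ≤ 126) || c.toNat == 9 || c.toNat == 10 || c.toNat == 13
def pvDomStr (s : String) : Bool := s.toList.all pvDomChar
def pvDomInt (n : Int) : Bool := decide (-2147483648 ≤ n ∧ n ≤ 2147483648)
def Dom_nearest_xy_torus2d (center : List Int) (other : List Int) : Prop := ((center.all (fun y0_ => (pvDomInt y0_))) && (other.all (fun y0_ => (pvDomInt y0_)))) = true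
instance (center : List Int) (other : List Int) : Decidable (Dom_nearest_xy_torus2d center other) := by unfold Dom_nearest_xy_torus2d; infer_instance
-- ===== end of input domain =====

-- B replaces A's nested 3x3 scan by two independent 1-D scans (the squared distance is
-- separable in x and y), keeping A's first-minimum tie-breaking per axis; objective: simpler.

-- ===== PORT A =====
-- literal port of A: nested loop over dy then dx, tracking (d, near); d = none models float("inf")
def nearest_xy_torus2d (center : List Int) (other : List Int) : List Int :=
  let x := PySem.List.pyGetD other 0 0
  let y := PySem.List.pyGetD other 1 0
  let st := (([-1, 0, 1] : List Int)).foldl (fun (s : Option Int × List Int) dy =>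
      let y0 := y + dy
      (([-1, 0, 1] : List Int)).foldl (fun (s : Option Int × List Int) dx =>
          let x0 := x + dx
          let dist := (PySem.List.pyGetD center 0 0 - x0) ^ 2 + (PySem.List.pyGetD center 1 0 - y0) ^ 2
          match s.1 with
          | none => (some dist, [x0, y0])
          | some d => if dist < d then (some dist, [x0, y0]) else s) s)
    (none, [x, y])
  st.2

-- ===== PORT B =====
-- port of Source B's _best_shift: 1-D scan over (0, 1) starting from shift -1; first strict minimum wins
def bestShift (c v : Int) : Int :=
  ((([0, 1] : List Int)).foldl (fun (s : Int × Int) delta =>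
      let dd := (c - (v + delta)) ^ 2
      if dd < s.1 then (dd, delta) else s) ((c - (v - 1)) ^ 2, -1)).2

def nearest_xy_torus2d_alt (center : List Int) (other : List Int) : List Int :=
  let x := PySem.List.pyGetD other 0 0
  let y := PySem.List.pyGetD other 1 0
  [x + bestShift (PySem.List.pyGetD center 0 0) x, y + bestShift (PySem.List.pyGetD center 1 0) y]

-- ===== PRECONDITION & SPEC =====
-- Pre_ excludes exactly the inputs where Python A raises IndexError: a list shorter than 2
def Pre_nearest_xy_torus2d (center : List Int) (other : List Int) : Prop :=
  2 ≤ center.length ∧ 2 ≤ other.length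
instance (center : List Int) (other : List Int) : Decidable (Pre_nearest_xy_torus2d center other) := by unfold Pre_nearest_xy_torus2d; infer_instance

def pvWitness_nearest_xy_torus2d : List Int × List Int := ([3, -2], [0, 0])

def Spec_nearest_xy_torus2d (center : List Int) (other : List Int) (out : List Int) : Prop := out = nearest_xy_torus2d_alt center other
instance (center : List Int) (other : List Int) (out : List Int) : Decidable (Spec_nearest_xy_torus2d center other out) := by unfold Spec_nearest_xy_torus2d; infer_instance

-- ===== CLAIM (what is proved, stated in full; the proofs are below) =====
def Claim_equal_nearest_xy_torus2d : Prop := ∀ (center : List Int) (other : List Int), Dom_nearest_xy_torus2d center other → Pre_nearest_xy_torus2d center other → Spec_nearest_xy_torus2d center other (nearest_xy_torus2d center other)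

-- ===== LEMMAS AND PROOFS =====

-- A's 3x3 scan, flattened: the 9 (dx, dy) pairs in A's iteration order (dy outer, dx inner)
def pvPairs : List (Int × Int) := [((-1 : Int), (-1 : Int)), ((0 : Int), (-1 : Int)), ((1 : Int), (-1 : Int)), ((-1 : Int), (0 : Int)), ((0 : Int), (0 : Int)), ((1 : Int), (0 : Int)), ((-1 : Int), (1 : Int)), ((0 : Int), (1 : Int)), ((1 : Int), (1 : Int))]

-- the squared distance A computes for the shift pair p
def pvKey (c0 c1 x y : Int) (p : Int × Int) : Int := (c0 - (x + p.1)) ^ 2 + (c1 - (y + p.2)) ^ 2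

-- one step of A's min-tracking loop
def pvStep (c0 c1 x y : Int) (s : Option Int × List Int) (p : Int × Int) : Option Int × List Int :=
  match s.1 with
  | none => (some (pvKey c0 c1 x y p), [x + p.1, y + p.2])
  | some d => if pvKey c0 c1 x y p < d then (some (pvKey c0 c1 x y p), [x + p.1, y + p.2]) else s

-- B's 1-D scan returns the if-closed form: +1 / -1 / 0 by which side of v the center falls
lemma bestShift_eq (c v : Int) :
    bestShift c v = if v + 1 ≤ c then 1 else if c ≤ v - 1 then -1 else 0 := by
  simp only [bestShift, List.foldl]
  split_ifs <;> first | rfl | nlinarith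

lemma bestShift_mem (c v : Int) : bestShift c v = -1 ∨ bestShift c v = 0 ∨ bestShift c v = 1 := by
  rw [bestShift_eq]; split_ifs <;> simp

lemma bestShift_le (c v : Int) (d : Int) (hd : d = -1 ∨ d = 0 ∨ d = 1) :
    (c - (v + bestShift c v)) ^ 2 ≤ (c - (v + d)) ^ 2 := by
  rw [bestShift_eq]; split_ifs <;> rcases hd with rfl | rfl | rfl <;> nlinarith

lemma bestShift_lt (c v : Int) (d : Int) (hd : d = -1 ∨ d = 0 ∨ d = 1) (h : d < bestShift c v) :
    (c - (v + bestShift c v)) ^ 2 < (c - (v + d)) ^ 2 := by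
  rw [bestShift_eq] at h ⊢; split_ifs at h ⊢ <;> rcases hd with rfl | rfl | rfl <;>
    first | omega | nlinarith

-- once the tracked minimum beats every remaining pair, the state never changes
lemma pvStay (c0 c1 x y : Int) : ∀ (l : List (Int × Int)) (d : Int) (nr : List Int),
    (∀ p ∈ l, ¬ pvKey c0 c1 x y p < d) →
    l.foldl (pvStep c0 c1 x y) (some d, nr) = (some d, nr) := by
  intro l
  induction l with
  | nil => intro d nr _; rfl
  | cons p l ih =>
    intro d nr h
    simp only [List.foldl_cons, pvStep]
    rw [if_neg (h p (by simp))]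
    exact ih d nr (fun q hq => h q (by simp [hq]))

-- a strictly-smaller q later in the list is reached and then kept
lemma pvReach (c0 c1 x y : Int) (q : Int × Int) (l2 : List (Int × Int))
    (h2 : ∀ p ∈ l2, ¬ pvKey c0 c1 x y p < pvKey c0 c1 x y q) :
    ∀ (l1 : List (Int × Int)) (d : Int) (nr : List Int),
    (∀ p ∈ l1, pvKey c0 c1 x y q < pvKey c0 c1 x y p) → pvKey c0 c1 x y q < d →
    (l1 ++ q :: l2).foldl (pvStep c0 c1 x y) (some d, nr) =
      (some (pvKey c0 c1 x y q), [x + q.1, y + q.2]) := by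
  intro l1
  induction l1 with
  | nil =>
    intro d nr _ hd
    simp only [List.nil_append, List.foldl_cons, pvStep]
    rw [if_pos hd]
    exact pvStay c0 c1 x y l2 _ _ h2
  | cons p l1 ih =>
    intro d nr h1 hd
    simp only [List.cons_append, List.foldl_cons, pvStep]
    by_cases hp : pvKey c0 c1 x y p < d
    · rw [if_pos hp]
      exact ih _ _ (fun r hr => h1 r (by simp [hr])) (h1 p (by simp))
    · rw [if_neg hp]
      exact ih d nr (fun r hr => h1 r (by simp [hr])) hd

-- the loop from the infinite start returns the FIRST pair attaining the minimum
lemma firstmin (c0 c1 x y : Int) (q : Int × Int) (l1 l2 : List (Int × Int))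
    (hsplit : pvPairs = l1 ++ q :: l2)
    (h1 : ∀ p ∈ l1, pvKey c0 c1 x y q < pvKey c0 c1 x y p)
    (h2 : ∀ p ∈ l2, ¬ pvKey c0 c1 x y p < pvKey c0 c1 x y q) :
    pvPairs.foldl (pvStep c0 c1 x y) (none, [x, y]) =
      (some (pvKey c0 c1 x y q), [x + q.1, y + q.2]) := by
  rw [hsplit]
  cases l1 with
  | nil =>
    simp only [List.nil_append, List.foldl_cons, pvStep]
    exact pvStay c0 c1 x y l2 _ _ h2
  | cons p l1 =>
    simp only [List.cons_append, List.foldl_cons, pvStep]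
    exact pvReach c0 c1 x y q l2 h2 l1 _ _
      (fun r hr => h1 r (by simp [hr])) (h1 p (by simp))

-- A's scan picks exactly (bestShift c0 x, bestShift c1 y)
lemma pairs_min (c0 c1 x y : Int) :
    (pvPairs.foldl (pvStep c0 c1 x y) (none, [x, y])).2 =
      [x + bestShift c0 x, y + bestShift c1 y] := by
  have fle := bestShift_le c0 x
  have flt := bestShift_lt c0 x
  have gle := bestShift_le c1 y
  have glt := bestShift_lt c1 y
  rcases bestShift_mem c0 x with hbx | hbx | hbx <;> rcases bestShift_mem c1 y with hby | hby | hby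
  · have h := firstmin c0 c1 x y (bestShift c0 x, bestShift c1 y)
      ([]) ([((0 : Int), (-1 : Int)), ((1 : Int), (-1 : Int)), ((-1 : Int), (0 : Int)), ((0 : Int), (0 : Int)), ((1 : Int), (0 : Int)), ((-1 : Int), (1 : Int)), ((0 : Int), (1 : Int)), ((1 : Int), (1 : Int))])
      (by rw [hbx, hby]; rfl) ?_ ?_
    · rw [h]
    · intro p hp; fin_cases hp <;> simp only [pvKey] <;>
        first
          | exact add_lt_add_of_le_of_lt (fle _ (by norm_num)) (glt _ (by norm_num) (by omega))
          | exact add_lt_add_of_lt_of_le (flt _ (by norm_num) (by omega)) (gle _ (by norm_num))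
    · intro p hp; fin_cases hp <;> simp only [pvKey] <;>
        exact not_lt.mpr (add_le_add (fle _ (by norm_num)) (gle _ (by norm_num)))
  · have h := firstmin c0 c1 x y (bestShift c0 x, bestShift c1 y)
      ([((-1 : Int), (-1 : Int)), ((0 : Int), (-1 : Int)), ((1 : Int), (-1 : Int))]) ([((0 : Int), (0 : Int)), ((1 : Int), (0 : Int)), ((-1 : Int), (1 : Int)), ((0 : Int), (1 : Int)), ((1 : Int), (1 : Int))])
      (by rw [hbx, hby]; rfl) ?_ ?_
    · rw [h]
    · intro p hp; fin_cases hp <;> simp only [pvKey] <;>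
        first
          | exact add_lt_add_of_le_of_lt (fle _ (by norm_num)) (glt _ (by norm_num) (by omega))
          | exact add_lt_add_of_lt_of_le (flt _ (by norm_num) (by omega)) (gle _ (by norm_num))
    · intro p hp; fin_cases hp <;> simp only [pvKey] <;>
        exact not_lt.mpr (add_le_add (fle _ (by norm_num)) (gle _ (by norm_num)))
  · have h := firstmin c0 c1 x y (bestShift c0 x, bestShift c1 y)
      ([((-1 : Int), (-1 : Int)), ((0 : Int), (-1 : Int)), ((1 : Int), (-1 : Int)), ((-1 : Int), (0 : Int)), ((0 : Int), (0 : Int)), ((1 : Int), (0 : Int))]) ([((0 : Int), (1 : Int)), ((1 : Int), (1 : Int))])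
      (by rw [hbx, hby]; rfl) ?_ ?_
    · rw [h]
    · intro p hp; fin_cases hp <;> simp only [pvKey] <;>
        first
          | exact add_lt_add_of_le_of_lt (fle _ (by norm_num)) (glt _ (by norm_num) (by omega))
          | exact add_lt_add_of_lt_of_le (flt _ (by norm_num) (by omega)) (gle _ (by norm_num))
    · intro p hp; fin_cases hp <;> simp only [pvKey] <;>
        exact not_lt.mpr (add_le_add (fle _ (by norm_num)) (gle _ (by norm_num)))
  · have h := firstmin c0 c1 x y (bestShift c0 x, bestShift c1 y)
      ([((-1 : Int), (-1 : Int))]) ([((1 : Int), (-1 : Int)), ((-1 : Int), (0 : Int)), ((0 : Int), (0 : Int)), ((1 : Int), (0 : Int)), ((-1 : Int), (1 : Int)), ((0 : Int), (1 : Int)), ((1 : Int), (1 : Int))])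
      (by rw [hbx, hby]; rfl) ?_ ?_
    · rw [h]
    · intro p hp; fin_cases hp <;> simp only [pvKey] <;>
        first
          | exact add_lt_add_of_le_of_lt (fle _ (by norm_num)) (glt _ (by norm_num) (by omega))
          | exact add_lt_add_of_lt_of_le (flt _ (by norm_num) (by omega)) (gle _ (by norm_num))
    · intro p hp; fin_cases hp <;> simp only [pvKey] <;>
        exact not_lt.mpr (add_le_add (fle _ (by norm_num)) (gle _ (by norm_num)))
  · have h := firstmin c0 c1 x y (bestShift c0 x, bestShift c1 y)
      ([((-1 : Int), (-1 : Int)), ((0 : Int), (-1 : Int)), ((1 : Int), (-1 : Int)), ((-1 : Int), (0 : Int))]) ([((1 : Int), (0 : Int)), ((-1 : Int), (1 : Int)), ((0 : Int), (1 : Int)), ((1 : Int), (1 : Int))])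
      (by rw [hbx, hby]; rfl) ?_ ?_
    · rw [h]
    · intro p hp; fin_cases hp <;> simp only [pvKey] <;>
        first
          | exact add_lt_add_of_le_of_lt (fle _ (by norm_num)) (glt _ (by norm_num) (by omega))
          | exact add_lt_add_of_lt_of_le (flt _ (by norm_num) (by omega)) (gle _ (by norm_num))
    · intro p hp; fin_cases hp <;> simp only [pvKey] <;>
        exact not_lt.mpr (add_le_add (fle _ (by norm_num)) (gle _ (by norm_num)))
  · have h := firstmin c0 c1 x y (bestShift c0 x, bestShift c1 y)
      ([((-1 : Int), (-1 : Int)), ((0 : Int), (-1 : Int)), ((1 : Int), (-1 : Int)), ((-1 : Int), (0 : Int)), ((0 : Int), (0 : Int)), ((1 : Int), (0 : Int)), ((-1 : Int), (1 : Int))]) ([((1 : Int), (1 : Int))])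
      (by rw [hbx, hby]; rfl) ?_ ?_
    · rw [h]
    · intro p hp; fin_cases hp <;> simp only [pvKey] <;>
        first
          | exact add_lt_add_of_le_of_lt (fle _ (by norm_num)) (glt _ (by norm_num) (by omega))
          | exact add_lt_add_of_lt_of_le (flt _ (by norm_num) (by omega)) (gle _ (by norm_num))
    · intro p hp; fin_cases hp <;> simp only [pvKey] <;>
        exact not_lt.mpr (add_le_add (fle _ (by norm_num)) (gle _ (by norm_num)))
  · have h := firstmin c0 c1 x y (bestShift c0 x, bestShift c1 y)
      ([((-1 : Int), (-1 : Int)), ((0 : Int), (-1 : Int))]) ([((-1 : Int), (0 : Int)), ((0 : Int), (0 : Int)), ((1 : Int), (0 : Int)), ((-1 : Int), (1 : Int)), ((0 : Int), (1 : Int)), ((1 : Int), (1 : Int))])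
      (by rw [hbx, hby]; rfl) ?_ ?_
    · rw [h]
    · intro p hp; fin_cases hp <;> simp only [pvKey] <;>
        first
          | exact add_lt_add_of_le_of_lt (fle _ (by norm_num)) (glt _ (by norm_num) (by omega))
          | exact add_lt_add_of_lt_of_le (flt _ (by norm_num) (by omega)) (gle _ (by norm_num))
    · intro p hp; fin_cases hp <;> simp only [pvKey] <;>
        exact not_lt.mpr (add_le_add (fle _ (by norm_num)) (gle _ (by norm_num)))
  · have h := firstmin c0 c1 x y (bestShift c0 x, bestShift c1 y)
      ([((-1 : Int), (-1 : Int)), ((0 : Int), (-1 : Int)), ((1 : Int), (-1 : Int)), ((-1 : Int), (0 : Int)), ((0 : Int), (0 : Int))]) ([((-1 : Int), (1 : Int)), ((0 : Int), (1 : Int)), ((1 : Int), (1 : Int))])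
      (by rw [hbx, hby]; rfl) ?_ ?_
    · rw [h]
    · intro p hp; fin_cases hp <;> simp only [pvKey] <;>
        first
          | exact add_lt_add_of_le_of_lt (fle _ (by norm_num)) (glt _ (by norm_num) (by omega))
          | exact add_lt_add_of_lt_of_le (flt _ (by norm_num) (by omega)) (gle _ (by norm_num))
    · intro p hp; fin_cases hp <;> simp only [pvKey] <;>
        exact not_lt.mpr (add_le_add (fle _ (by norm_num)) (gle _ (by norm_num)))
  · have h := firstmin c0 c1 x y (bestShift c0 x, bestShift c1 y)
      ([((-1 : Int), (-1 : Int)), ((0 : Int), (-1 : Int)), ((1 : Int), (-1 : Int)), ((-1 : Int), (0 : Int)), ((0 : Int), (0 : Int)), ((1 : Int), (0 : Int)), ((-1 : Int), (1 : Int)), ((0 : Int), (1 : Int))]) ([])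
      (by rw [hbx, hby]; rfl) ?_ ?_
    · rw [h]
    · intro p hp; fin_cases hp <;> simp only [pvKey] <;>
        first
          | exact add_lt_add_of_le_of_lt (fle _ (by norm_num)) (glt _ (by norm_num) (by omega))
          | exact add_lt_add_of_lt_of_le (flt _ (by norm_num) (by omega)) (gle _ (by norm_num))
    · intro p hp; fin_cases hp <;> simp only [pvKey] <;>
        exact not_lt.mpr (add_le_add (fle _ (by norm_num)) (gle _ (by norm_num)))

-- A's nested fold over the two literal lists is definitionally the flat fold over pvPairs
lemma core (c0 c1 x y : Int) :
    ((([-1, 0, 1] : List Int)).foldl (fun (s : Option Int × List Int) dy =>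
      (([-1, 0, 1] : List Int)).foldl (fun (s : Option Int × List Int) dx =>
          match s.1 with
          | none => (some ((c0 - (x + dx)) ^ 2 + (c1 - (y + dy)) ^ 2), [x + dx, y + dy])
          | some d => if (c0 - (x + dx)) ^ 2 + (c1 - (y + dy)) ^ 2 < d then
              (some ((c0 - (x + dx)) ^ 2 + (c1 - (y + dy)) ^ 2), [x + dx, y + dy]) else s) s)
    (none, [x, y])).2 = [x + bestShift c0 x, y + bestShift c1 y] := by
  have h : (([-1, 0, 1] : List Int)).foldl (fun (s : Option Int × List Int) dy =>
      (([-1, 0, 1] : List Int)).foldl (fun (s : Option Int × List Int) dx =>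
          match s.1 with
          | none => (some ((c0 - (x + dx)) ^ 2 + (c1 - (y + dy)) ^ 2), [x + dx, y + dy])
          | some d => if (c0 - (x + dx)) ^ 2 + (c1 - (y + dy)) ^ 2 < d then
              (some ((c0 - (x + dx)) ^ 2 + (c1 - (y + dy)) ^ 2), [x + dx, y + dy]) else s) s)
    (none, [x, y]) = pvPairs.foldl (pvStep c0 c1 x y) (none, [x, y]) := rfl
  rw [h]
  exact pairs_min c0 c1 x y

-- ===== VERDICT (by name: the statement is the Claim_ definition above) =====
theorem nearest_xy_torus2d_spec : Claim_equal_nearest_xy_torus2d := by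
  intro center other _ _
  unfold Spec_nearest_xy_torus2d nearest_xy_torus2d nearest_xy_torus2d_alt
  exact core (PySem.List.pyGetD center 0 0) (PySem.List.pyGetD center 1 0)
    (PySem.List.pyGetD other 0 0) (PySem.List.pyGetD other 1 0)
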